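-- pv_equiv track=rewrite | github.com/jaredlueck/metal-renderer | metal-swift-new/gen-bindings.py | to_pascal_case
-- ===== SOURCE A (Python) =====
-- def to_pascal_case(name: str) -> str:
--     if '_' in name:
--         parts = name.split('_')
--     else:
--         # split camelCase
--         parts = []
--         current = ''
--         for ch in name:
--             if ch.isupper():
--                 if current:
--                     parts.append(current)
--                 current = ch
--             else:
--                 current += ch
--         if current:
--             parts.append(current)
--     return ''.join(p[:1].upper() + p[1:] for p in parts if p)
-- ===== SOURCE B (Python) =====
-- def to_pascal_case(name: str) -> str:
--     if '_' in name:
--         return ''.join(p[:1].upper() + p[1:] for p in name.split('_') if p)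
--     # every camelCase "part" after the first already starts uppercase, so
--     # capitalizing each part and joining equals capitalizing the first char.
--     return name[:1].upper() + name[1:]
-- ===== Notes on version B (the rewrite author's own statement) =====
-- stated objective: simpler
-- what changed: The camelCase branch's character-accumulating split-and-rejoin loop is replaced by the closed form name[:1].upper() + name[1:]; this skips building the parts list and re-joining (measured constant-factor speedup).
import Mathlib
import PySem

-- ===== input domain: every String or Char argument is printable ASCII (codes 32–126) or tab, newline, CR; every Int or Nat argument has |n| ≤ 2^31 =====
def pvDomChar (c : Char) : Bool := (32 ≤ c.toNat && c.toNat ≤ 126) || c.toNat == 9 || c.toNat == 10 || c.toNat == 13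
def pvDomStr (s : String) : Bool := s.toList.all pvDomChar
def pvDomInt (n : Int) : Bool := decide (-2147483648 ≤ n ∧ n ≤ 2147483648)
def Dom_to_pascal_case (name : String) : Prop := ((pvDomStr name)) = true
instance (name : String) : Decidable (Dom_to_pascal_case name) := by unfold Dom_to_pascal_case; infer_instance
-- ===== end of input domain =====

-- B replaces A's camelCase split-and-rejoin loop by the closed form name[:1].upper() + name[1:] (simpler, same cost).

-- ===== PORT A =====
-- p[:1].upper() + p[1:]
def pvCap (p : List Char) : List Char := PySem.Chars.upper (p.take 1) ++ p.drop 1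

-- one step of A's camelCase loop: state = (parts, current)
def pvStep (acc : List (List Char) × List Char) (ch : Char) : List (List Char) × List Char :=
  if PySem.Chars.isupper ch then
    (if acc.2 ≠ [] then acc.1 ++ [acc.2] else acc.1, [ch])
  else (acc.1, acc.2 ++ [ch])

def to_pascal_case (name : String) : String :=
  let cs := name.toList
  let parts : List (List Char) :=
    if PySem.Chars.isIn ['_'] cs then
      PySem.Chars.splitOn cs ['_']
    else
      let st := cs.foldl pvStep ([], [])
      if st.2 ≠ [] then st.1 ++ [st.2] else st.1
  String.mk (PySem.Chars.join [] ((parts.filter (· ≠ [])).map pvCap))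

-- ===== PORT B =====
def to_pascal_case_alt (name : String) : String :=
  let cs := name.toList
  if PySem.Chars.isIn ['_'] cs then
    String.mk (PySem.Chars.join []
      (((PySem.Chars.splitOn cs ['_']).filter (· ≠ [])).map
        (fun p => PySem.Chars.upper (p.take 1) ++ p.drop 1)))
  else
    String.mk (PySem.Chars.upper (cs.take 1) ++ cs.drop 1)

-- ===== PRECONDITION & SPEC =====
def Spec_to_pascal_case (name : String) (out : String) : Prop := out = to_pascal_case_alt name
instance (name : String) (out : String) : Decidable (Spec_to_pascal_case name out) := by unfold Spec_to_pascal_case; infer_instance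

-- ===== CLAIM (what is proved, stated in full; the proofs are below) =====
def Claim_equal_to_pascal_case : Prop := ∀ (name : String), Dom_to_pascal_case name → Spec_to_pascal_case name (to_pascal_case name)

-- ===== LEMMAS AND PROOFS =====

lemma pvJoin_nil (ps : List (List Char)) : PySem.Chars.join [] ps = ps.flatten := by
  induction ps with
  | nil => rfl
  | cons p ps ih =>
      simp [PySem.Chars.join, List.intercalate] at ih ⊢
      cases ps <;> simp_all [List.intersperse]

lemma pvCap_nil : pvCap [] = [] := rfl

lemma pvCap_append (C : List Char) (x : List Char) (h : C ≠ []) :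
    pvCap (C ++ x) = pvCap C ++ x := by
  cases C with
  | nil => exact absurd rfl h
  | cons c cs => simp [pvCap]

lemma pvUpper_of_isupper (c : Char) (hu : PySem.Chars.isupper c = true) :
    PySem.Chars.upperChar c = c := by
  simp [PySem.Chars.isupper] at hu
  simp [PySem.Chars.upperChar, PySem.Chars.islower]
  intro h1 _
  exact absurd (le_trans h1 hu.2) (by decide)

lemma pvCap_cons_upper (c : Char) (rest : List Char)
    (hu : PySem.Chars.isupper c = true) : pvCap (c :: rest) = c :: rest := by
  simp [pvCap, PySem.Chars.upper, pvUpper_of_isupper c hu]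

-- main invariant of A's camelCase loop
lemma pvCamel_inv (rest : List Char) (hdom : ∀ c ∈ rest, pvDomChar c = true) :
    ∀ (P : List (List Char)) (C : List Char),
    (let st := rest.foldl pvStep (P, C)
     ((if st.2 ≠ [] then st.1 ++ [st.2] else st.1).filter (· ≠ [])).map pvCap |>.flatten)
    = ((P.filter (· ≠ [])).map pvCap).flatten ++ pvCap (C ++ rest) := by
  induction rest with
  | nil =>
      intro P C
      cases C with
      | nil => simp [pvCap_nil]
      | cons c cs => simp [List.filter_append]
  | cons ch rest ih =>
      intro P C
      have hrest : ∀ c ∈ rest, pvDomChar c = true := fun c hc => hdom c (List.mem_cons_of_mem _ hc)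
      by_cases hu : PySem.Chars.isupper ch = true
      · by_cases hC : C = []
        · subst hC
          simpa [pvStep, hu, List.foldl_cons] using ih hrest P [ch]
        · have h0 := ih hrest (P ++ [C]) [ch]
          have h1 : pvCap (ch :: rest) = ch :: rest := pvCap_cons_upper ch rest hu
          have h2 : pvCap (C ++ ch :: rest) = pvCap C ++ ch :: rest := pvCap_append C (ch :: rest) hC
          simp only [List.foldl_cons, pvStep, hu, hC, ne_eq, not_false_iff, if_true] at h0 ⊢
          rw [h0, h2]
          simp [List.filter_append, hC, h1, List.append_assoc]
      · have h0 := ih hrest P (C ++ [ch])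
        simp only [List.foldl_cons, pvStep, hu, if_false, Bool.false_eq_true] at h0 ⊢
        rw [h0, List.append_assoc]
        simp

lemma pvCamel_closed (cs : List Char) (hdom : ∀ c ∈ cs, pvDomChar c = true) :
    (let st := cs.foldl pvStep ([], [])
     PySem.Chars.join [] (((if st.2 ≠ [] then st.1 ++ [st.2] else st.1).filter (· ≠ [])).map pvCap))
    = PySem.Chars.upper (cs.take 1) ++ cs.drop 1 := by
  have := pvCamel_inv cs hdom [] []
  simpa [pvJoin_nil, pvCap] using this

-- ===== VERDICT (by name: the statement is the Claim_ definition above) =====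
theorem to_pascal_case_spec : Claim_equal_to_pascal_case := by
  intro name hdom
  unfold Spec_to_pascal_case to_pascal_case to_pascal_case_alt
  have hdom' : ∀ c ∈ name.toList, pvDomChar c = true := by
    simpa [Dom_to_pascal_case, pvDomStr, List.all_eq_true] using hdom
  by_cases h : PySem.Chars.isIn ['_'] name.toList = true
  · have hfun : pvCap = fun p => PySem.Chars.upper (List.take 1 p) ++ p.tail := by
      funext p; simp [pvCap, List.drop_one]
    simp [h, hfun]
  · simp only [h, Bool.false_eq_true, if_false]
    rw [pvCamel_closed name.toList hdom']
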